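-- pv_equiv track=rewrite | github.com/GitofHJH/Programmers-with-Python | Level_3/230329 숫자 게임.py | solution
-- ===== SOURCE A (Python) =====
-- from collections import deque
--
-- def solution(A, B):
--     answer = 0
--     A = deque(sorted(A))
--     B = deque(sorted(B))
--
--     for _ in range(len(A)):
--         a = A.pop()
--         b = B.pop()
--         if a >= b:
--             B.append(b)
--             b = B.popleft()
--             if a < b:
--                 answer += 1
--         else:
--             answer += 1
--
--     return answer
-- ===== SOURCE B (Python) =====
-- def solution(A, B):
--     A = sorted(A)
--     B = sorted(B)
--     wins = 0
--     i = j = 0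
--     while i < len(A) and j < len(B):
--         if A[i] < B[j]:
--             wins += 1
--             i += 1
--         j += 1
--     return wins
-- ===== Notes on version B (the rewrite author's own statement) =====
-- stated objective: simpler
-- what changed: Replaces the deque-based largest-first greedy (pop both maxes, rotate the losing minimum to the front) with an ascending two-pointer merge scan over the two sorted lists that counts each smallest B beating the current smallest A.
import Mathlib
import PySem

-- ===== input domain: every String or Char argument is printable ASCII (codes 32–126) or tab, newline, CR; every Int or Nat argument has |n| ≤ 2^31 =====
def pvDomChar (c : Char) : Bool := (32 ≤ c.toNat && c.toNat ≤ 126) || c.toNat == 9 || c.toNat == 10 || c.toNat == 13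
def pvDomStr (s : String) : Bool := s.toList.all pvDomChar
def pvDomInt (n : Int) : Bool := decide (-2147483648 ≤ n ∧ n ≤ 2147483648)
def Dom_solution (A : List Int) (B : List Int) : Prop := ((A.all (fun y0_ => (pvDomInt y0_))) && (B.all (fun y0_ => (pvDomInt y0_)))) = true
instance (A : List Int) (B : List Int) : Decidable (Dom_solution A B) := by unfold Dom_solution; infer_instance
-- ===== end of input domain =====

-- B replaces A's deque-based largest-first greedy with an ascending two-pointer merge scan
-- over the two sorted lists (objective: simpler); same return value whenever A returns.

-- ===== PORT A =====
-- the for-loop over range(len(A)) with the two deques (pop = getLast, popleft = head,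
-- append = push at the end); an empty-deque pop (Python IndexError) returns the accumulator,
-- excluded by Pre_solution.
def pvLoopA : Nat → List Int → List Int → Int → Int
  | 0, _, _, ans => ans
  | n + 1, As, Bs, ans =>
    match As.getLast? with
    | none => ans                    -- IndexError in Python (outside Pre_)
    | some a =>
      match Bs.getLast? with
      | none => ans                  -- IndexError in Python (outside Pre_)
      | some b =>
        if b ≤ a then
          match Bs.dropLast ++ [b] with      -- B.append(b) after B.pop(); then B.popleft()
          | [] => ans                        -- unreachable (list ends with b)
          | b2 :: rest =>
            pvLoopA n As.dropLast rest (if a < b2 then ans + 1 else ans)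
        else
          pvLoopA n As.dropLast Bs.dropLast (ans + 1)

def solution (A : List Int) (B : List Int) : Int :=
  let As := PySem.List.sorted A (fun x => x) false
  let Bs := PySem.List.sorted B (fun x => x) false
  pvLoopA As.length As Bs 0

-- ===== PORT B =====
-- the while loop: remaining suffixes of sorted A / sorted B stand for the indices i, j
def pvGoB : List Int → List Int → Int → Int
  | a :: as, b :: bs, wins =>
    if a < b then pvGoB as bs (wins + 1) else pvGoB (a :: as) bs wins
  | _, _, wins => wins
termination_by as bs _ => as.length + bs.length

def solution_alt (A : List Int) (B : List Int) : Int :=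
  pvGoB (PySem.List.sorted A (fun x => x) false) (PySem.List.sorted B (fun x => x) false) 0

-- ===== PRECONDITION & SPEC =====
-- Pre_ excludes exactly the inputs where A raises IndexError (B's deque empties before the loop ends).
def Pre_solution (A : List Int) (B : List Int) : Prop := A.length ≤ B.length
instance (A : List Int) (B : List Int) : Decidable (Pre_solution A B) := by
  unfold Pre_solution; infer_instance

def pvWitness_solution : List Int × List Int := ([3, 1, 2], [2, 4, 3])

def Spec_solution (A : List Int) (B : List Int) (out : Int) : Prop := out = solution_alt A B
instance (A : List Int) (B : List Int) (out : Int) : Decidable (Spec_solution A B out) := by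
  unfold Spec_solution; infer_instance

-- ===== CLAIM (what is proved, stated in full; the proofs are below) =====
def Claim_equal_solution : Prop := ∀ (A : List Int) (B : List Int), Dom_solution A B →
  Pre_solution A B → Spec_solution A B (solution A B)


-- ===== LEMMAS AND PROOFS =====

-- accumulator-free version of pvGoB, for the lemmas
def pvG : List Int → List Int → Int
  | a :: as, b :: bs => if a < b then 1 + pvG as bs else pvG (a :: as) bs
  | _, _ => 0
termination_by as bs => as.length + bs.length

theorem pvG_nil_left (bs : List Int) : pvG [] bs = 0 := by
  cases bs <;> simp [pvG]

theorem pvG_nil_right (as : List Int) : pvG as [] = 0 := by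
  cases as <;> simp [pvG]

theorem pvGoB_eq : ∀ (as bs : List Int) (w : Int), pvGoB as bs w = w + pvG as bs
  | [], bs, w => by cases bs <;> simp [pvGoB, pvG]
  | a :: as, [], w => by simp [pvGoB, pvG]
  | a :: as, b :: bs, w => by
    by_cases h : a < b
    · simp only [pvGoB, pvG, if_pos h]
      rw [pvGoB_eq as bs (w + 1)]; ring
    · simp only [pvGoB, pvG, if_neg h]
      exact pvGoB_eq (a :: as) bs w
termination_by as bs _ => as.length + bs.length

-- a single a wins exactly once if any b beats it
theorem pvG_single_win (a : Int) : ∀ (bs : List Int), (∃ x ∈ bs, a < x) → pvG [a] bs = 1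
  | [], h => by simp at h
  | b :: bs, h => by
    by_cases hb : a < b
    · simp [pvG, hb, pvG_nil_left]
    · have : ∃ x ∈ bs, a < x := by
        rcases h with ⟨x, hx, hax⟩
        rcases List.mem_cons.1 hx with rfl | hx
        · exact absurd hax hb
        · exact ⟨x, hx, hax⟩
      simp only [pvG, if_neg hb]
      exact pvG_single_win a bs this

-- T: with strictly fewer b's than a's, the largest a is never matched
theorem pvG_dropLast_left : ∀ (bs as : List Int), bs.length < as.length →
    pvG as bs = pvG as.dropLast bs
  | [], as, _ => by rw [pvG_nil_right, pvG_nil_right]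
  | b :: bs, [], h => by simp at h
  | b :: bs, a1 :: as', h => by
    have has' : as' ≠ [] := by
      intro hnil; subst hnil; simp at h
    have hdl : (a1 :: as').dropLast = a1 :: as'.dropLast := by
      cases as' with
      | nil => exact absurd rfl has'
      | cons x xs => simp [List.dropLast]
    by_cases hab : a1 < b
    · have hlen : bs.length < as'.length := by simp at h ⊢; omega
      simp only [pvG, if_pos hab, hdl]
      rw [pvG_dropLast_left bs as' hlen]
    · have hlen : bs.length < (a1 :: as').length := by simp at h ⊢; omega
      simp only [pvG, if_neg hab, hdl]
      rw [pvG_dropLast_left bs (a1 :: as') hlen, hdl]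
termination_by bs _ => bs.length

-- L2a: appending an a that no b beats does not change the count
theorem pvG_append_max : ∀ (bs as : List Int) (a : Int), (∀ x ∈ bs, x ≤ a) →
    pvG (as ++ [a]) bs = pvG as bs
  | [], as, a, _ => by rw [pvG_nil_right, pvG_nil_right]
  | b :: bs, [], a, h => by
    have hb : ¬ a < b := not_lt.2 (h b (List.mem_cons_self))
    have : ∀ x ∈ bs, x ≤ a := fun x hx => h x (List.mem_cons_of_mem _ hx)
    have hrec := pvG_append_max bs [] a this
    simp only [List.nil_append] at hrec
    simp only [List.nil_append, pvG, if_neg hb]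
    simp [hrec, pvG_nil_left]
  | b :: bs, a1 :: as', a, h => by
    have hbs : ∀ x ∈ bs, x ≤ a := fun x hx => h x (List.mem_cons_of_mem _ hx)
    by_cases hab : a1 < b
    · simp only [List.cons_append, pvG, if_pos hab]
      rw [pvG_append_max bs as' a hbs]
    · simp only [List.cons_append, pvG, if_neg hab]
      rw [show (a1 :: (as' ++ [a])) = (a1 :: as') ++ [a] by simp,
        pvG_append_max bs (a1 :: as') a hbs]
termination_by bs _ _ => bs.length

-- L2b: with strictly more b's than a's, the smallest b is dispensable
theorem pvG_tail_right : ∀ (bs as : List Int), bs.Pairwise (· ≤ ·) →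
    as.length < bs.length → pvG as bs = pvG as bs.tail
  | [], as, _, h => by simp at h
  | b :: bs, [], _, _ => by rw [pvG_nil_left, List.tail_cons, pvG_nil_left]
  | b :: bs, a1 :: as', hp, h => by
    have hpbs : bs.Pairwise (· ≤ ·) := hp.of_cons
    by_cases hab : a1 < b
    · obtain ⟨b2, bs', rfl⟩ : ∃ b2 bs', bs = b2 :: bs' := by
        cases bs with
        | nil => simp at h
        | cons x xs => exact ⟨x, xs, rfl⟩
      have hb2 : b ≤ b2 := (List.pairwise_cons.1 hp).1 b2 (List.mem_cons_self)
      have hab2 : a1 < b2 := lt_of_lt_of_le hab hb2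
      simp only [pvG, if_pos hab, List.tail_cons, if_pos hab2]
      have hlen : as'.length < (b2 :: bs').length := by simp at h ⊢; omega
      rw [pvG_tail_right (b2 :: bs') as' hpbs hlen, List.tail_cons]
    · simp only [pvG, if_neg hab, List.tail_cons]
termination_by bs _ => bs.length

-- helper: in a ≤-sorted list every element is ≤ the last one
theorem pairwise_le_getLast : ∀ (l : List Int), l.Pairwise (· ≤ ·) →
    ∀ (h : l ≠ []) (x : Int), x ∈ l → x ≤ l.getLast h
  | [], _, h, _, _ => absurd rfl h
  | a :: l', hp, h, x, hx => by
    cases l' with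
    | nil => simp at hx; simp [hx, List.getLast]
    | cons c l'' =>
      have hne : (c :: l'') ≠ [] := by simp
      rw [List.getLast_cons hne]
      rcases List.mem_cons.1 hx with rfl | hx'
      · exact le_trans ((List.pairwise_cons.1 hp).1 c (List.mem_cons_self))
          (pairwise_le_getLast (c :: l'') hp.of_cons hne c (List.mem_cons_self))
      · exact pairwise_le_getLast (c :: l'') hp.of_cons hne x hx'

-- L1: when the largest b beats every a, both maxima are matched to each other
theorem pvG_concat_win : ∀ (n : Nat) (A B' : List Int) (b : Int),
    A.length + B'.length ≤ n → A ≠ [] → A.Pairwise (· ≤ ·) → B'.Pairwise (· ≤ ·) →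
    (∀ x ∈ B', x ≤ b) → (∀ x ∈ A, x < b) → A.length ≤ B'.length + 1 →
    pvG A (B' ++ [b]) = 1 + pvG A.dropLast B' := by
  intro n
  induction n with
  | zero => intro A B' b hn hA _ _ _ _ _; cases A with
    | nil => exact absurd rfl hA
    | cons x xs => simp at hn
  | succ n ih =>
    intro A B' b hn hA hpA hpB hBle hAlt hlen
    cases A with
    | nil => exact absurd rfl hA
    | cons a1 A2 =>
      cases A2 with
      | nil =>
        rw [pvG_single_win a1 (B' ++ [b]) ⟨b, by simp, hAlt a1 (List.mem_cons_self)⟩]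
        simp [pvG_nil_left]
      | cons a2 A3 =>
        obtain ⟨b1, B2, rfl⟩ : ∃ b1 B2, B' = b1 :: B2 := by
          cases B' with
          | nil => simp at hlen
          | cons x xs => exact ⟨x, xs, rfl⟩
        have hdlA : (a1 :: a2 :: A3).dropLast = a1 :: (a2 :: A3).dropLast := by
          simp [List.dropLast]
        have hpA2 : (a2 :: A3).Pairwise (· ≤ ·) := hpA.of_cons
        have hpB2 : B2.Pairwise (· ≤ ·) := hpB.of_cons
        have hB2le : ∀ x ∈ B2, x ≤ b := fun x hx => hBle x (List.mem_cons_of_mem _ hx)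
        by_cases hab : a1 < b1
        · -- heads match
          simp only [List.cons_append, pvG, if_pos hab, hdlA]
          rw [ih (a2 :: A3) B2 b (by simp only [List.length_cons] at hn ⊢; omega) (by simp) hpA2 hpB2 hB2le
            (fun x hx => hAlt x (List.mem_cons_of_mem _ hx)) (by
              simp only [List.length_cons] at hlen ⊢; omega)]
        · -- smallest b skipped on both sides
          simp only [List.cons_append, pvG, hdlA, if_neg hab]
          by_cases hcase : (a1 :: a2 :: A3).length ≤ B2.length + 1
          · rw [ih (a1 :: a2 :: A3) B2 b (by simp only [List.length_cons] at hn ⊢; omega) (by simp) hpA hpB2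
              hB2le hAlt hcase, hdlA]
          · -- tight case: one b too few; the largest a is dispensable on both sides
            have hlt : (B2 ++ [b]).length < (a1 :: a2 :: A3).length := by
              simp only [List.length_cons, List.length_append, List.length_nil] at hcase ⊢
              omega
            rw [pvG_dropLast_left (B2 ++ [b]) (a1 :: a2 :: A3) hlt, hdlA]
            have hXsub : (a1 :: (a2 :: A3).dropLast).Sublist (a1 :: a2 :: A3) := by
              rw [← hdlA]; exact List.dropLast_sublist _
            have hXlen : (a1 :: (a2 :: A3).dropLast).length = A3.length + 1 := by simp
            have hpX : (a1 :: (a2 :: A3).dropLast).Pairwise (· ≤ ·) := hpA.sublist hXsub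
            have hXlt : ∀ x ∈ (a1 :: (a2 :: A3).dropLast), x < b :=
              fun x hx => hAlt x (hXsub.mem hx)
            have hlenX : (a1 :: (a2 :: A3).dropLast).length ≤ B2.length + 1 := by
              simp only [List.length_cons] at hlen hcase; rw [hXlen]; omega
            rw [ih (a1 :: (a2 :: A3).dropLast) B2 b
              (by simp only [List.length_cons] at hn; rw [hXlen]; omega) (by simp) hpX hpB2 hB2le hXlt hlenX]
            have hlt2 : B2.length < (a1 :: (a2 :: A3).dropLast).length := by
              simp only [List.length_cons] at hlen hcase; rw [hXlen]; omega
            rw [← pvG_dropLast_left B2 (a1 :: (a2 :: A3).dropLast) hlt2]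

-- main loop invariant: A's deque loop computes pvG on sorted inputs with enough b's
theorem pvLoopA_eq_pvG : ∀ (m : Nat) (As Bs : List Int) (ans : Int),
    As.length = m → As.Pairwise (· ≤ ·) → Bs.Pairwise (· ≤ ·) →
    As.length ≤ Bs.length → pvLoopA m As Bs ans = ans + pvG As Bs := by
  intro m
  induction m with
  | zero =>
    intro As Bs ans hm _ _ _
    rw [List.length_eq_zero_iff.1 hm, pvG_nil_left]
    simp [pvLoopA]
  | succ n ih =>
    intro As Bs ans hm hpA hpB hlen
    have hAne : As ≠ [] := by intro h; subst h; simp at hm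
    have hBne : Bs ≠ [] := by
      intro h; subst h; simp at hlen
      rw [hlen] at hm; simp at hm
    have ha := List.getLast?_eq_getLast_of_ne_nil hAne
    have hb := List.getLast?_eq_getLast_of_ne_nil hBne
    set a := As.getLast hAne with hadef
    set b := Bs.getLast hBne with hbdef
    have hAdec : As.dropLast ++ [a] = As := List.dropLast_append_getLast hAne
    have hBdec : Bs.dropLast ++ [b] = Bs := List.dropLast_append_getLast hBne
    have hpAd : As.dropLast.Pairwise (· ≤ ·) := hpA.sublist (List.dropLast_sublist _)
    have hpBd : Bs.dropLast.Pairwise (· ≤ ·) := hpB.sublist (List.dropLast_sublist _)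
    have hlA : As.dropLast.length = n := by
      have := List.length_dropLast (xs := As); omega
    simp only [pvLoopA, ha, hb]
    by_cases hba : b ≤ a
    · -- a >= b : rotate the smallest b out
      rw [if_pos hba, hBdec]
      obtain ⟨b2, rest, hB2⟩ : ∃ b2 rest, Bs = b2 :: rest := by
        cases Bs with
        | nil => exact absurd rfl hBne
        | cons x xs => exact ⟨x, xs, rfl⟩
      have hb2b : b2 ≤ b := by
        rw [hbdef]
        exact pairwise_le_getLast Bs hpB hBne b2 (by rw [hB2]; exact List.mem_cons_self)
      have hnlt : ¬ a < b2 := not_lt.2 (le_trans hb2b hba)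
      have hprest : rest.Pairwise (· ≤ ·) := by
        have := hpB; rw [hB2] at this; exact this.of_cons
      have hlenr : As.dropLast.length ≤ rest.length := by
        have : Bs.length = rest.length + 1 := by rw [hB2]; simp
        omega
      rw [hB2]
      simp only [if_neg hnlt]
      rw [ih As.dropLast rest ans hlA hpAd hprest hlenr]
      -- pvG As Bs = pvG As.dropLast Bs.tail
      have hble : ∀ x ∈ Bs, x ≤ a :=
        fun x hx => le_trans (pairwise_le_getLast Bs hpB hBne x hx) hba
      have h2a : pvG As Bs = pvG As.dropLast Bs := by
        conv_lhs => rw [← hAdec]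
        exact pvG_append_max Bs As.dropLast a hble
      have h2b : pvG As.dropLast Bs = pvG As.dropLast Bs.tail := by
        refine pvG_tail_right Bs As.dropLast hpB ?_
        omega
      rw [hB2] at h2a h2b
      simp only [List.tail_cons] at h2b
      rw [h2a, h2b]
    · -- b > a : both maxima matched
      rw [if_neg hba]
      rw [ih As.dropLast Bs.dropLast (ans + 1) hlA hpAd hpBd
        (by have h1 := List.length_dropLast (xs := As); have h2 := List.length_dropLast (xs := Bs); omega)]
      have hAlt : ∀ x ∈ As, x < b :=
        fun x hx => lt_of_le_of_lt (pairwise_le_getLast As hpA hAne x hx) (not_le.1 hba)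
      have : pvG As Bs = 1 + pvG As.dropLast Bs.dropLast := by
        conv_lhs => rw [← hBdec]
        exact pvG_concat_win (As.length + Bs.dropLast.length) As Bs.dropLast b le_rfl
          hAne hpA hpBd (fun x hx => pairwise_le_getLast Bs hpB hBne x
            ((List.dropLast_sublist _).mem hx)) hAlt
          (by have := List.length_dropLast (xs := Bs); omega)
      rw [this]; ring

-- ===== VERDICT (by name: the statement is the Claim_ definition above) =====
theorem solution_spec : Claim_equal_solution := by
  intro A B _ hpre
  unfold Spec_solution solution solution_alt
  have hpA := PySem.List.sorted_pairwise (xs := A) (key := fun x => x)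
  have hpB := PySem.List.sorted_pairwise (xs := B) (key := fun x => x)
  have hlA := PySem.List.length_sorted (xs := A) (key := fun x => x) (rev := false)
  have hlB := PySem.List.length_sorted (xs := B) (key := fun x => x) (rev := false)
  have hlen : (PySem.List.sorted A (fun x => x) false).length ≤
      (PySem.List.sorted B (fun x => x) false).length := by
    rw [hlA, hlB]; exact hpre
  rw [pvLoopA_eq_pvG (PySem.List.sorted A (fun x => x) false).length _ _ 0 rfl hpA hpB hlen,
    pvGoB_eq]
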